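-- pv_equiv track=rewrite | github.com/kevinp8/Codewars | 6.Highest Scoring Word/script.py | high
-- ===== SOURCE A (Python) =====
-- import string
--
-- def high(x):
--     highscore = 0
--     alphabet = string.ascii_lowercase
--     word = ''
--     for i in x.split():
--         score = 0
--         for j in i:
--             score += alphabet.index(j)+1
--         if score > highscore:
--             highscore = score
--             score = 0
--             word = i
--     return word
-- ===== SOURCE B (Python) =====
-- import string
--
-- def high(x):
--     words = x.split()
--     if not words:
--         return ''
--
--     def score(w):
--         return sum(string.ascii_lowercase.index(c) + 1 for c in w)
--
--     return sorted(words, key=score, reverse=True)[0]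
-- ===== Notes on version B (the rewrite author's own statement) =====
-- stated objective: idiomatic
-- what changed: The manual running-max loop with two mutable accumulators is replaced by a sort-then-pick: sort the words by their letter score with reverse=True (stable, so ties keep the first occurrence) and return the first element.
import Mathlib
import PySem

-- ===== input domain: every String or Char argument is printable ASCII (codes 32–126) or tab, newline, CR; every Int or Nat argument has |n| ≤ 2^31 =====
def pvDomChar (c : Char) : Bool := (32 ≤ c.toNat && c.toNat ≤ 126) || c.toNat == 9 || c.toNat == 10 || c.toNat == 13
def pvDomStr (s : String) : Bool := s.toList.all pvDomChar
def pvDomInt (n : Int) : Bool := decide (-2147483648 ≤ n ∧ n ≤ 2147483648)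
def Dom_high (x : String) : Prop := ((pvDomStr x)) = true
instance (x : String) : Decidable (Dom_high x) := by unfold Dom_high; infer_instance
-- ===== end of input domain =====

-- B replaces A's running-max loop by a stable reverse sort of the words by letter score, taking the first element (idiomatic; same ties).

-- ===== PORT A =====
-- alphabet.index(j) raises ValueError on a char outside 'a'..'z'; Pre_high excludes
-- those inputs, and the port uses .getD 0 there (unconstrained outside Pre_).
def high (x : String) : String :=
  let alphabet : List Char := "abcdefghijklmnopqrstuvwxyz".toList
  let r := (PySem.Str.split₀ x).foldl
      (fun (st : Int × String) i =>
        let score : Int := i.toList.foldl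
          (fun s j => s + (((PySem.List.index? alphabet j).getD 0 : Int) + 1)) 0
        if st.1 < score then (score, i) else st)
      (0, "")
  r.2

-- ===== PORT B =====
def scoreW (w : String) : Int :=
  (w.toList.map (fun c => ((PySem.List.index? "abcdefghijklmnopqrstuvwxyz".toList c).getD 0 : Int) + 1)).sum

def high_alt (x : String) : String :=
  let words := PySem.Str.split₀ x
  match PySem.List.sorted words scoreW true with
  | [] => ""
  | w :: _ => w

-- ===== PRECONDITION & SPEC =====
-- Pre_high: every character is whitespace or a lowercase letter; on any other
-- character inside a word A's alphabet.index raises ValueError.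
def Pre_high (x : String) : Prop :=
  x.toList.all (fun c => (" \t\n\r".toList.contains c) || ('a' ≤ c && c ≤ 'z')) = true
instance (x : String) : Decidable (Pre_high x) := by unfold Pre_high; infer_instance
def pvWitness_high : String := "man i need a taxi up to ubud"

def Spec_high (x : String) (out : String) : Prop := out = high_alt x
instance (x : String) (out : String) : Decidable (Spec_high x out) := by unfold Spec_high; infer_instance

-- ===== CLAIM (what is proved, stated in full; the proofs are below) =====
def Claim_equal_high : Prop := ∀ (x : String), Dom_high x → Pre_high x → Spec_high x (high x)

-- ===== LEMMAS AND PROOFS =====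

-- every word produced by split() is nonempty
lemma split₀_go_ne_nil (s : List Char) : ∀ (cur : List Char) (acc : List (List Char)),
    (∀ w ∈ acc, w ≠ []) → ∀ w ∈ PySem.Chars.split₀.go s cur acc, w ≠ [] := by
  induction s with
  | nil =>
      intro cur acc hacc w hw
      by_cases hc : cur.isEmpty
      · simp [PySem.Chars.split₀.go, hc] at hw
        exact hacc w hw
      · simp [PySem.Chars.split₀.go, hc] at hw
        rcases hw with hw | hw
        · exact hacc w hw
        · subst hw; simpa [List.isEmpty_iff] using hc
  | cons c rest ih =>
      intro cur acc hacc w hw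
      by_cases hs : PySem.Chars.isspace c
      · by_cases hc : cur.isEmpty
        · simp only [PySem.Chars.split₀.go, hs, hc, if_true] at hw
          exact ih [] acc hacc w hw
        · simp only [PySem.Chars.split₀.go, hs, hc, if_true] at hw
          refine ih [] (cur.reverse :: acc) ?_ w hw
          intro u hu
          rcases List.mem_cons.mp hu with hu | hu
          · subst hu; simpa [List.isEmpty_iff] using hc
          · exact hacc u hu
      · simp only [PySem.Chars.split₀.go, hs, Bool.false_eq_true, if_false] at hw
        exact ih (c :: cur) acc hacc w hw

lemma mem_split₀_ne_nil (x : String) (w : String) (hw : w ∈ PySem.Str.split₀ x) :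
    w.toList ≠ [] := by
  simp only [PySem.Str.split₀, List.mem_map] at hw
  obtain ⟨l, hl, rfl⟩ := hw
  have hne : l ≠ [] :=
    split₀_go_ne_nil x.toList [] [] (by simp) l (by simpa [PySem.Chars.split₀] using hl)
  simpa using hne

lemma scoreW_pos (w : String) (hw : w.toList ≠ []) : 0 < scoreW w := by
  unfold scoreW
  cases h : w.toList with
  | nil => exact absurd h hw
  | cons c cs =>
      simp only [List.map_cons, List.sum_cons]
      have h1 : (0:Int) ≤ ((PySem.List.index? "abcdefghijklmnopqrstuvwxyz".toList c).getD 0 : Int) := by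
        positivity
      have h2 : (0:Int) ≤ (cs.map (fun c => ((PySem.List.index? "abcdefghijklmnopqrstuvwxyz".toList c).getD 0 : Int) + 1)).sum := by
        apply List.sum_nonneg
        intro a ha
        simp only [List.mem_map] at ha
        obtain ⟨d, _, rfl⟩ := ha
        positivity
      omega

-- insertBy never returns the empty list
lemma insertBy_ne_nil {α : Type} (before : α → α → Bool) (x : α) (L : List α) :
    PySem.List.insertBy before x L ≠ [] := by
  cases L with
  | nil => simp [PySem.List.insertBy]
  | cons y ys =>
      simp only [PySem.List.insertBy]
      split <;> simp

lemma foldl_insertBy_ne_nil {α : Type} (before : α → α → Bool) (ws : List α) (L : List α)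
    (hL : L ≠ []) :
    ws.foldl (fun acc x => PySem.List.insertBy before x acc) L ≠ [] := by
  induction ws generalizing L with
  | nil => exact hL
  | cons i rest ih => exact ih _ (insertBy_ne_nil before i L)

lemma headD_congr {α : Type} (l : List α) (a b : α) (h : l ≠ []) : l.headD a = l.headD b := by
  cases l with
  | nil => exact absurd rfl h
  | cons x xs => rfl

-- the running-max fold computes the head of the insertBy fold
lemma fold_head (ws : List String) (hpos : ∀ w ∈ ws, 0 < scoreW w) :
    ∀ (L : List String) (h : Int) (w : String),
      ((L = [] ∧ h = 0 ∧ w = "") ∨ (∃ t, L = w :: t ∧ h = scoreW w)) →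
      (ws.foldl (fun st i => if st.1 < scoreW i then (scoreW i, i) else st) (h, w)).2
        = (ws.foldl (fun acc x => PySem.List.insertBy (fun a b => decide (scoreW b < scoreW a)) x acc) L).headD w := by
  induction ws with
  | nil =>
      intro L h w hinv
      rcases hinv with ⟨rfl, rfl, rfl⟩ | ⟨t, rfl, rfl⟩ <;> simp
  | cons i rest ih =>
      intro L h w hinv
      have hposr : ∀ u ∈ rest, 0 < scoreW u := fun u hu => hpos u (List.mem_cons_of_mem _ hu)
      rcases hinv with ⟨rfl, rfl, rfl⟩ | ⟨t, rfl, rfl⟩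
      · have hi : (0:Int) < scoreW i := hpos i (List.mem_cons_self ..)
        simp only [List.foldl_cons, hi, if_pos, PySem.List.insertBy]
        have := ih hposr [i] (scoreW i) i (Or.inr ⟨[], rfl, rfl⟩)
        refine this.trans (headD_congr _ _ _ ?_)
        exact foldl_insertBy_ne_nil _ rest [i] (by simp)
      · by_cases hlt : scoreW w < scoreW i
        · simp only [List.foldl_cons, PySem.List.insertBy, hlt, if_pos, decide_true]
          have := ih hposr (i :: w :: t) (scoreW i) i (Or.inr ⟨w :: t, rfl, rfl⟩)
          refine this.trans (headD_congr _ _ _ ?_)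
          exact foldl_insertBy_ne_nil _ rest (i :: w :: t) (by simp)
        · simp only [List.foldl_cons, PySem.List.insertBy, hlt, decide_false,
            Bool.false_eq_true, if_false]
          exact ih hposr (w :: PySem.List.insertBy (fun a b => decide (scoreW b < scoreW a)) i t)
            (scoreW w) w (Or.inr ⟨_, rfl, rfl⟩)

-- ===== VERDICT (by name: the statement is the Claim_ definition above) =====
theorem high_spec : Claim_equal_high := by
  intro x _ _
  unfold Spec_high high high_alt
  have hstep : (fun (st : Int × String) (i : String) =>
      let score : Int := i.toList.foldl
        (fun s j => s + (((PySem.List.index? "abcdefghijklmnopqrstuvwxyz".toList j).getD 0 : Int) + 1)) 0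
      if st.1 < score then (score, i) else st)
      = (fun (st : Int × String) (i : String) => if st.1 < scoreW i then (scoreW i, i) else st) := by
    funext st i
    rw [PySem.List.foldl_add]
    simp [scoreW]
  simp only [hstep]
  have hpos : ∀ w ∈ PySem.Str.split₀ x, 0 < scoreW w :=
    fun w hw => scoreW_pos w (mem_split₀_ne_nil x w hw)
  have hmain := fold_head (PySem.Str.split₀ x) hpos [] 0 "" (Or.inl ⟨rfl, rfl, rfl⟩)
  rw [hmain, PySem.List.sorted_rev_eq_foldl_insertBy]
  cases (PySem.Str.split₀ x).foldl
      (fun acc x => PySem.List.insertBy (fun a b => decide (scoreW b < scoreW a)) x acc) [] <;> rfl
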